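-- pv_equiv track=rewrite | github.com/Osman-Geomatics93/GeoScrapling | scrapling/geo/parsers/metadata.py | _ns
-- ===== SOURCE A (Python) =====
-- _NS = {
--     "gmd": "http://www.isotc211.org/2005/gmd",
--     "gco": "http://www.isotc211.org/2005/gco",
--     "gmx": "http://www.isotc211.org/2005/gmx",
--     "gml": "http://www.opengis.net/gml/3.2",
--     "srv": "http://www.isotc211.org/2005/srv",
--     "dc": "http://purl.org/dc/elements/1.1/",
--     "dct": "http://purl.org/dc/terms/",
-- }
--
-- def _ns(path: str) -> str:
--     """Expand namespace prefixes in an XPath-like path."""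
--     parts = path.split("/")
--     expanded: list[str] = []
--     for part in parts:
--         if ":" in part:
--             prefix, local = part.split(":", 1)
--             if prefix in _NS:
--                 expanded.append(f"{{{_NS[prefix]}}}{local}")
--             else:
--                 expanded.append(part)
--         else:
--             expanded.append(part)
--     return "/".join(expanded)
-- ===== SOURCE B (Python) =====
-- _NS = {
--     "gmd": "http://www.isotc211.org/2005/gmd",
--     "gco": "http://www.isotc211.org/2005/gco",
--     "gmx": "http://www.isotc211.org/2005/gmx",
--     "gml": "http://www.opengis.net/gml/3.2",
--     "srv": "http://www.isotc211.org/2005/srv",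
--     "dc": "http://purl.org/dc/elements/1.1/",
--     "dct": "http://purl.org/dc/terms/",
-- }
--
--
-- def _ns(path: str) -> str:
--     """Expand namespace prefixes in an XPath-like path (single left-to-right scan)."""
--     out = []
--     i, n = 0, len(path)
--     while i < n:
--         if path[i] == '/':
--             out.append('/')
--             i += 1
--         else:
--             j = i
--             while j < n and path[j] != '/':
--                 j += 1
--             seg = path[i:j]
--             k = seg.find(':')
--             if k >= 0:
--                 uri = _NS.get(seg[:k])
--                 out.append('{' + uri + '}' + seg[k + 1:] if uri is not None else seg)
--             else:
--                 out.append(seg)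
--             i = j
--     return ''.join(out)
-- ===== Notes on version B (the rewrite author's own statement) =====
-- stated objective: alternative
-- what changed: Replaces the split('/')/per-part-loop/'/'.join pipeline with a single left-to-right index scan that copies '/' separators directly and rewrites each maximal non-'/' segment in place, splitting a segment at its first ':' via find and slicing instead of split(':', 1).
import Mathlib
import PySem

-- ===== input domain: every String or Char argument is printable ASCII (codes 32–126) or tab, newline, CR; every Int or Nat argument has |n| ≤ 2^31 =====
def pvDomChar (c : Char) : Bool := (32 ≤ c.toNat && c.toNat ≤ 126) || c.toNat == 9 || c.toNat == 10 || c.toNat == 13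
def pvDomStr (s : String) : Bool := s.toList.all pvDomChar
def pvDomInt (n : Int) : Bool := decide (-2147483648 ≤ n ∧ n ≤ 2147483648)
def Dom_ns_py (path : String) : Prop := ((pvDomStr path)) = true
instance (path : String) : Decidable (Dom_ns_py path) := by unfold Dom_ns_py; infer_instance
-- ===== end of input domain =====

-- B replaces A's split('/')/loop/join pipeline by a single left-to-right scan over the characters
-- (objective: alternative — same O(n) cost, different traversal).

-- ===== PORT A =====
def nsTable : PySem.Dict String String :=
  PySem.Dict.ofList
    [("gmd", "http://www.isotc211.org/2005/gmd"),
     ("gco", "http://www.isotc211.org/2005/gco"),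
     ("gmx", "http://www.isotc211.org/2005/gmx"),
     ("gml", "http://www.opengis.net/gml/3.2"),
     ("srv", "http://www.isotc211.org/2005/srv"),
     ("dc", "http://purl.org/dc/elements/1.1/"),
     ("dct", "http://purl.org/dc/terms/")]

-- one loop body of A: expand a single part ('prefix, local = part.split(":", 1)';
-- the f-string "{...}..." is ported as a separator-less join of its four pieces)
def nsPartA (part : String) : String :=
  if PySem.Str.isIn ":" part then
    match PySem.Str.splitMax? part ":" 1 with
    | some (pre :: loc :: _) =>
      match PySem.Dict.get? nsTable pre with
      | some uri => PySem.Str.join "" ["{", uri, "}", loc]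
      | none => part
    | _ => part  -- unreachable: split(":", 1) with ":" in part yields two pieces
  else part

def ns_py (path : String) : String :=
  match PySem.Str.split? path "/" with
  | some parts => PySem.Str.join "/" (parts.foldl (fun acc p => acc ++ [nsPartA p]) [])
  | none => path  -- unreachable: the separator "/" is non-empty

-- ===== PORT B =====
def nsTableC : PySem.Dict (List Char) (List Char) :=
  PySem.Dict.ofList
    [("gmd".toList, "http://www.isotc211.org/2005/gmd".toList),
     ("gco".toList, "http://www.isotc211.org/2005/gco".toList),
     ("gmx".toList, "http://www.isotc211.org/2005/gmx".toList),
     ("gml".toList, "http://www.opengis.net/gml/3.2".toList),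
     ("srv".toList, "http://www.isotc211.org/2005/srv".toList),
     ("dc".toList, "http://purl.org/dc/elements/1.1/".toList),
     ("dct".toList, "http://purl.org/dc/terms/".toList)]

-- B's segment rewrite: k = seg.find(':'); seg[:k] looked up, '{' + uri + '}' + seg[k+1:]
def replSegB (seg : List Char) : List Char :=
  let k := PySem.Chars.find seg [':']
  if 0 ≤ k then
    match PySem.Dict.get? nsTableC (PySem.List.slice seg none (some k)) with
    | some uri => '{' :: uri ++ '}' :: PySem.List.slice seg (some (k + 1)) none
    | none => seg
  else seg

-- B's outer while loop: copy '/'; otherwise scan the maximal non-'/' run and rewrite it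
def altGo : List Char → List Char
  | [] => []
  | c :: rest =>
    if c = '/' then '/' :: altGo rest
    else replSegB (c :: rest.takeWhile (· ≠ '/')) ++ altGo (rest.dropWhile (· ≠ '/'))
termination_by l => l.length
decreasing_by
  · simp
  · have := List.length_dropWhile_le (fun x => decide (x ≠ '/')) rest
    simp only [List.length_cons]
    omega

def ns_py_alt (path : String) : String := String.ofList (altGo path.toList)

-- ===== PRECONDITION & SPEC =====
def Spec_ns_py (path : String) (out : String) : Prop := out = ns_py_alt path
instance (path : String) (out : String) : Decidable (Spec_ns_py path out) := by unfold Spec_ns_py; infer_instance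

-- ===== CLAIM (what is proved, stated in full; the proofs are below) =====
def Claim_equal_ns_py : Prop := ∀ (path : String), Dom_ns_py path → Spec_ns_py path (ns_py path)

-- ===== LEMMAS AND PROOFS =====

def split1 : List Char → List Char × List (List Char)
  | [] => ([], [])
  | c :: r =>
    if c = '/' then ([], (split1 r).1 :: (split1 r).2)
    else (c :: (split1 r).1, (split1 r).2)

lemma splitOn_go (fuel : Nat) : ∀ (l cur : List Char) (acc : List (List Char)),
    l.length < fuel →
    PySem.Chars.splitOn.go ['/'] fuel l cur acc
      = acc.reverse ++ ((cur.reverse ++ (split1 l).1) :: (split1 l).2) := by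
  induction fuel with
  | zero => intro l cur acc h; omega
  | succ n ih =>
    intro l cur acc h
    match l with
    | [] => simp [PySem.Chars.splitOn.go, split1]
    | c :: rest =>
      rw [PySem.Chars.splitOn.go]
      by_cases hc : c = '/'
      · subst hc
        simp only [if_pos (by simp [List.isPrefixOf] : List.isPrefixOf ['/'] ('/' :: rest) = true)]
        simp only [List.length_cons, List.drop_succ_cons, List.length_nil, List.drop_zero]
        rw [ih rest [] (cur.reverse :: acc) (by simp at h; omega)]
        simp [split1]
      · have hpre : List.isPrefixOf ['/'] (c :: rest) = false := by
          simp [List.isPrefixOf, Ne.symm hc]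
        simp only [hpre, Bool.false_eq_true, if_false]
        rw [ih rest (c :: cur) acc (by simp at h; omega)]
        simp [split1, hc]

lemma splitOn_eq (s : List Char) :
    PySem.Chars.splitOn s ['/'] = (split1 s).1 :: (split1 s).2 := by
  rw [PySem.Chars.splitOn, splitOn_go (s.length + 1) s [] [] (by omega)]
  simp

lemma splitOnMax_go_zero (fuel : Nat) (l cur : List Char) (acc : List (List Char)) :
    PySem.Chars.splitOnMax.go [':'] fuel 0 l cur acc = acc.reverse ++ [cur.reverse ++ l] := by
  match fuel, l with
  | 0, l =>
    simp only [PySem.Chars.splitOnMax.go]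
    simp
  | n+1, [] =>
    simp only [PySem.Chars.splitOnMax.go]
    simp
  | n+1, c :: rest =>
    simp only [PySem.Chars.splitOnMax.go]
    simp
lemma splitOnMax_go_one (fuel : Nat) : ∀ (l cur : List Char) (acc : List (List Char)),
    l.length < fuel →
    PySem.Chars.splitOnMax.go [':'] fuel 1 l cur acc
      = acc.reverse ++
          (if ':' ∈ l then
            [cur.reverse ++ l.takeWhile (· ≠ ':'), (l.dropWhile (· ≠ ':')).tail]
          else [cur.reverse ++ l]) := by
  induction fuel with
  | zero => intro l cur acc h; omega
  | succ n ih =>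
    intro l cur acc h
    match l with
    | [] =>
      simp only [PySem.Chars.splitOnMax.go]
      simp
    | c :: rest =>
      simp only [PySem.Chars.splitOnMax.go]
      by_cases hc : c = ':'
      · subst hc
        simp only [if_pos (by simp [List.isPrefixOf] : List.isPrefixOf [':'] (':' :: rest) = true),
          if_neg (by omega : ¬ (1 : Nat) = 0)]
        simp only [List.length_cons, List.drop_succ_cons, List.length_nil, List.drop_zero]
        rw [splitOnMax_go_zero]
        simp [List.takeWhile, List.dropWhile]
      · have hpre : List.isPrefixOf [':'] (c :: rest) = false := by
          simp [List.isPrefixOf, Ne.symm hc]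
        simp only [hpre, Bool.false_eq_true, if_false, if_neg (by omega : ¬ (1 : Nat) = 0)]
        rw [ih rest (c :: cur) acc (by simp at h; omega)]
        by_cases hm : ':' ∈ rest
        · simp [hm, hc, List.takeWhile, List.dropWhile]
        · simp [hm, Ne.symm hc]
lemma splitOnMax_colon (part : List Char) :
    PySem.Chars.splitOnMax part [':'] 1
      = if ':' ∈ part then
          [part.takeWhile (· ≠ ':'), (part.dropWhile (· ≠ ':')).tail]
        else [part] := by
  rw [PySem.Chars.splitOnMax]
  simp only [if_neg (by omega : ¬ (1:Int) < 0), Int.toNat_one]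
  rw [splitOnMax_go_one (part.length + 1) part [] [] (by simp)]
  simp
lemma prefix_singleton_iff (a : Char) (l : List Char) : [a] <+: l ↔ l.head? = some a := by
  constructor
  · rintro ⟨t, rfl⟩; rfl
  · intro h
    match l, h with
    | b :: t, h => exact ⟨t, by simp at h; simp [h]⟩

lemma find_colon_of_not_mem (seg : List Char) (h : ':' ∉ seg) :
    PySem.Chars.find seg [':'] = -1 := by
  rw [PySem.Chars.find_eq_neg_one_iff]
  intro hinf
  exact h (hinf.subset (by simp))

lemma find_colon_of_mem (seg : List Char) (h : ':' ∈ seg) :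
    PySem.Chars.find seg [':'] = ((seg.takeWhile (· ≠ ':')).length : Int) := by
  have hinf : [':'] <:+: seg := by
    obtain ⟨s1, s2, rfl⟩ := List.append_of_mem h
    exact ⟨s1, s2, by simp⟩
  have h0 : 0 ≤ PySem.Chars.find seg [':'] := (PySem.Chars.find_nonneg_iff seg [':']).mpr hinf
  obtain ⟨hpre, hmin⟩ := PySem.Chars.find_spec h0
  set k := (PySem.Chars.find seg [':']).toNat with hkdef
  set t := seg.takeWhile (· ≠ ':') with ht
  set d := seg.dropWhile (· ≠ ':') with hd
  have hsplit : t ++ d = seg := List.takeWhile_append_dropWhile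
  have hdne : d ≠ [] := by
    intro hnil
    have : seg = t := by rw [← hsplit, hnil, List.append_nil]
    rw [this] at h
    have := List.mem_takeWhile_imp h
    simp at this
  have hdhead : d.head? = some ':' := by
    have h2 := List.head_dropWhile_not (p := fun x => decide (x ≠ ':')) (l := seg) (by rw [← hd]; exact hdne)
    simp only [← hd] at h2
    simp at h2
    rw [List.head?_eq_some_head hdne, h2]
  have hk : k = t.length := by
    by_contra hne
    rcases Nat.lt_or_ge k t.length with hlt | hge
    · -- seg[k] would be in t, but t's elements are ≠ ':'
      have hk? : seg[k]? = some ':' := by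
        rw [← List.head?_drop]
        exact (prefix_singleton_iff _ _).mp hpre
      have : seg[k]? = t[k]? := by
        conv_lhs => rw [← hsplit]
        rw [List.getElem?_append_left hlt]
      rw [this] at hk?
      have hmem : (':' : Char) ∈ t := List.mem_of_getElem? hk?
      have := List.mem_takeWhile_imp hmem
      simp at this
    · have hlt : t.length < k := by omega
      have := hmin t.length hlt
      apply this
      rw [(by rw [← hsplit, List.drop_left] : seg.drop t.length = d)]
      exact (prefix_singleton_iff _ _).mpr hdhead
  omega

lemma beq_toList (a s : String) : (a == s) = (a.toList == s.toList) := by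
  by_cases h : a = s
  · subst h; simp
  · have h2 : a.toList ≠ s.toList := fun hl => h (by
      have := congrArg String.ofList hl
      simpa using this)
    simp [h, h2]

lemma dict_bridge (s : String) :
    PySem.Dict.get? nsTable s = (PySem.Dict.get? nsTableC s.toList).map String.ofList := by
  have hA : nsTable = PySem.Dict.mk
    [("gmd", "http://www.isotc211.org/2005/gmd"),
     ("gco", "http://www.isotc211.org/2005/gco"),
     ("gmx", "http://www.isotc211.org/2005/gmx"),
     ("gml", "http://www.opengis.net/gml/3.2"),
     ("srv", "http://www.isotc211.org/2005/srv"),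
     ("dc", "http://purl.org/dc/elements/1.1/"),
     ("dct", "http://purl.org/dc/terms/")] := by rfl
  have hB : nsTableC = PySem.Dict.mk
    [("gmd".toList, "http://www.isotc211.org/2005/gmd".toList),
     ("gco".toList, "http://www.isotc211.org/2005/gco".toList),
     ("gmx".toList, "http://www.isotc211.org/2005/gmx".toList),
     ("gml".toList, "http://www.opengis.net/gml/3.2".toList),
     ("srv".toList, "http://www.isotc211.org/2005/srv".toList),
     ("dc".toList, "http://purl.org/dc/elements/1.1/".toList),
     ("dct".toList, "http://purl.org/dc/terms/".toList)] := by rfl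
  rw [hA, hB]
  simp only [PySem.Dict.get?_mk_cons, beq_toList]
  split_ifs <;> rfl

-- the two per-part transforms agree
lemma part_bridge (p : String) : (nsPartA p).toList = replSegB p.toList := by
  unfold nsPartA replSegB
  by_cases hm : ':' ∈ p.toList
  · have hIn : PySem.Str.isIn ":" p = true := by
      rw [PySem.Str.isIn_eq, (by decide : (":" : String).toList = [':']), PySem.Chars.isIn_iff_infix]
      obtain ⟨s1, s2, hsp⟩ := List.append_of_mem hm
      exact ⟨s1, s2, by simp [hsp]⟩
    rw [if_pos hIn]
    have hchars : PySem.Chars.splitMax? p.toList [':'] 1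
        = some [p.toList.takeWhile (· ≠ ':'), (p.toList.dropWhile (· ≠ ':')).tail] := by
      rw [PySem.Chars.splitMax?]
      rw [if_neg (by simp), splitOnMax_colon, if_pos hm]
    set t := p.toList.takeWhile (· ≠ ':') with ht
    set d := p.toList.dropWhile (· ≠ ':') with hd
    have hsm : PySem.Str.splitMax? p ":" 1
        = some [String.ofList t, String.ofList d.tail] := by
      have hmap := PySem.Str.splitMax?_map p ":" 1
      rw [(by decide : (":" : String).toList = [':']), hchars] at hmap
      match hx : PySem.Str.splitMax? p ":" 1 with
      | none => rw [hx] at hmap; simp at hmap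
      | some xs =>
        rw [hx] at hmap
        simp only [Option.map_some, Option.some.injEq] at hmap
        match xs, hmap with
        | [], hmap => simp at hmap
        | [a], hmap => simp at hmap
        | a :: b :: c :: r, hmap => simp at hmap
        | [a, b], hmap =>
          simp only [List.map_cons, List.map_nil, List.cons.injEq, and_true] at hmap
          obtain ⟨ha, hb⟩ := hmap
          have ha' : a = String.ofList t := by rw [← ha]; simp
          have hb' : b = String.ofList d.tail := by rw [← hb]; simp
          rw [ha', hb']
    rw [hsm]
    have hfind : PySem.Chars.find p.toList [':'] = (t.length : Int) := find_colon_of_mem _ hm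
    have hsplit : t ++ d = p.toList := List.takeWhile_append_dropWhile
    simp only [hfind]
    rw [if_pos (by positivity)]
    have hslice1 : PySem.List.slice p.toList none (some (t.length : Int)) = t := by
      rw [PySem.List.slice_to _ (by positivity)]
      simp only [Int.toNat_natCast]
      conv_lhs => rw [← hsplit]
      exact List.take_left
    have hslice2 : PySem.List.slice p.toList (some ((t.length : Int) + 1)) none = d.tail := by
      rw [PySem.List.slice_from _ (by positivity)]
      have : ((t.length : Int) + 1).toNat = t.length + 1 := by omega
      rw [this]
      conv_lhs => rw [← hsplit]
      rw [← List.drop_drop, List.drop_left, List.drop_one]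
    rw [hslice1, hslice2]
    have hdict := dict_bridge (String.ofList t)
    rw [(by simp : (String.ofList t).toList = t)] at hdict
    rw [hdict]
    match hu : PySem.Dict.get? nsTableC t with
    | none => simp
    | some uriC =>
      simp only [Option.map_some]
      rw [PySem.Str.toList_join]
      simp only [List.map_cons, List.map_nil]
      rw [PySem.Chars.join_cons_cons, PySem.Chars.join_cons_cons, PySem.Chars.join_cons_cons,
        PySem.Chars.join_singleton]
      simp
  · have hInC : PySem.Chars.isIn [':'] p.toList = false := by
      rw [PySem.Chars.isIn_eq_false_iff]
      intro hinf
      exact hm (hinf.subset (by simp))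
    have hIn : PySem.Str.isIn ":" p = false := by
      rw [PySem.Str.isIn_eq, (by decide : (":" : String).toList = [':']), hInC]
    rw [if_neg (by simp only [hIn]; simp)]
    have hfind : PySem.Chars.find p.toList [':'] = -1 := find_colon_of_not_mem _ hm
    simp [hfind]

lemma split1_slash (r : List Char) : split1 ('/' :: r) = ([], (split1 r).1 :: (split1 r).2) := by
  simp [split1]

lemma split1_cons {c : Char} (hc : c ≠ '/') (r : List Char) :
    split1 (c :: r) = (c :: (split1 r).1, (split1 r).2) := by
  simp [split1, hc]

lemma altGo_slash (r : List Char) : altGo ('/' :: r) = '/' :: altGo r := by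
  rw [altGo]; simp

lemma altGo_cons {c : Char} (hc : c ≠ '/') (r : List Char) :
    altGo (c :: r) = replSegB (c :: r.takeWhile (· ≠ '/')) ++ altGo (r.dropWhile (· ≠ '/')) := by
  rw [altGo, if_neg hc]

lemma replSegB_nil : replSegB [] = [] := rfl

lemma altGo_eq (s : List Char) :
    altGo s = replSegB (s.takeWhile (· ≠ '/')) ++ altGo (s.dropWhile (· ≠ '/')) := by
  match s with
  | [] => simp [altGo, replSegB_nil]
  | c :: r =>
    by_cases hc : c = '/'
    · subst hc
      rw [List.takeWhile_cons_of_neg (by simp), List.dropWhile_cons_of_neg (by simp),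
          replSegB_nil, List.nil_append]
    · rw [altGo_cons hc, List.takeWhile_cons_of_pos (by simp [hc]),
          List.dropWhile_cons_of_pos (by simp [hc])]

lemma join_split (n : Nat) : ∀ (s : List Char), s.length ≤ n → ∀ (pre : List Char),
    PySem.Chars.join ['/'] (((pre ++ (split1 s).1) :: (split1 s).2).map replSegB)
      = replSegB (pre ++ s.takeWhile (· ≠ '/')) ++ altGo (s.dropWhile (· ≠ '/')) := by
  induction n with
  | zero =>
    intro s hs pre
    match s, hs with
    | [], _ => simp [split1, PySem.Chars.join_singleton, altGo]
  | succ n ih =>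
    intro s hs pre
    match s with
    | [] => simp [split1, PySem.Chars.join_singleton, altGo]
    | c :: r =>
      by_cases hc : c = '/'
      · subst hc
        rw [split1_slash]
        simp only [List.append_nil, List.map_cons]
        rw [PySem.Chars.join_cons_cons]
        have hih := ih r (by simp at hs; omega) []
        simp only [List.nil_append] at hih
        rw [← List.map_cons, hih, ← altGo_eq r]
        rw [List.takeWhile_cons_of_neg (by simp), List.dropWhile_cons_of_neg (by simp),
            altGo_slash]
        simp
      · rw [split1_cons hc]
        have h2 : pre ++ (c :: (split1 r).1) = (pre ++ [c]) ++ (split1 r).1 := by simp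
        rw [h2]
        have hih := ih r (by simp at hs; omega) (pre ++ [c])
        rw [hih, List.takeWhile_cons_of_pos (by simp [hc]),
            List.dropWhile_cons_of_pos (by simp [hc])]
        simp

lemma main_chars (s : List Char) :
    PySem.Chars.join ['/'] (((split1 s).1 :: (split1 s).2).map replSegB) = altGo s := by
  have h := join_split s.length s le_rfl []
  simp only [List.nil_append] at h
  rw [h, ← altGo_eq s]

lemma ns_py_eq : ∀ (path : String), ns_py path = ns_py_alt path := by
  intro path
  unfold ns_py ns_py_alt
  have hsp : PySem.Str.split? path "/"
      = some (((split1 path.toList).1 :: (split1 path.toList).2).map String.ofList) := by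
    have hmap := PySem.Str.split?_map path "/"
    rw [(by decide : ("/" : String).toList = ['/'])] at hmap
    rw [PySem.Chars.split?, if_neg (by simp), splitOn_eq] at hmap
    match hx : PySem.Str.split? path "/" with
    | none => rw [hx] at hmap; simp at hmap
    | some xs =>
      rw [hx] at hmap
      simp only [Option.map_some, Option.some.injEq] at hmap
      rw [← hmap, List.map_map]
      congr 1
      have : ∀ x ∈ xs, (String.ofList ∘ String.toList) x = id x := by
        intro x _; simp
      rw [List.map_congr_left this, List.map_id]
  rw [hsp]
  show PySem.Str.join "/" ((((split1 path.toList).1 :: (split1 path.toList).2).map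
      String.ofList).foldl (fun acc p => acc ++ [nsPartA p]) []) = _
  rw [PySem.List.foldl_append_singleton_eq_map, List.nil_append]
  have hrepl : ∀ x, ((String.toList ∘ nsPartA) ∘ String.ofList) x = replSegB x := by
    intro x
    simp only [Function.comp_apply]
    rw [part_bridge]
    simp
  have h : (PySem.Str.join "/" (List.map nsPartA
      (((split1 path.toList).1 :: (split1 path.toList).2).map String.ofList))).toList
      = altGo path.toList := by
    rw [PySem.Str.toList_join, (by decide : ("/" : String).toList = ['/']),
        List.map_map, List.map_map]
    rw [List.map_congr_left (fun x _ => hrepl x)]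
    exact main_chars path.toList
  rw [← h, String.ofList_toList]

-- ===== VERDICT (by name: the statement is the Claim_ definition above) =====
theorem ns_py_spec : Claim_equal_ns_py := by
  intro path _
  unfold Spec_ns_py
  exact ns_py_eq path
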